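-- pv_equiv track=rewrite | github.com/Steward605/TreeBasedSearch | dfs.py | _has_node_beyond_depth
-- ===== SOURCE A (Python) =====
-- def _has_node_beyond_depth(start_node, graph, depth_limit):
--     """
--     Helper function:
--     Checks if there are nodes beyond current depth limit.
--     Prevents infinite looping in IDDFS.
--     """
--     frontier = [(start_node, 0)]
--     visited = set()
--
--     while frontier:
--         current_node, current_depth = frontier.pop()
--
--         if (current_node, current_depth) in visited:
--             continue
--         visited.add((current_node, current_depth))
--
--         # If deeper node exists → continue IDDFS
--         if current_depth > depth_limit:
--             return True
--
--         outgoing_edges = graph.get(current_node, [])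
--         neighbor_nodes = sorted((neighbor for neighbor, cost in outgoing_edges), reverse=True)
--
--         for neighbor_node in neighbor_nodes:
--             frontier.append((neighbor_node, current_depth + 1))
--
--     return False
-- ===== SOURCE B (Python) =====
-- def _has_node_beyond_depth(start_node, graph, depth_limit):
--     """Level-set iteration: the set of nodes reachable by a walk of length d,
--     advanced one depth at a time; True iff depth depth_limit+1 is populated."""
--     if depth_limit < 0:
--         return True
--     level = {start_node}
--     for _ in range(depth_limit + 1):
--         level = {nbr for node in level for nbr, _ in graph.get(node, [])}
--         if not level:
--             return False
--     return True
-- ===== Notes on version B (the rewrite author's own statement) =====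
-- stated objective: alternative
-- what changed: Replaces A's depth-tagged DFS (explicit stack of (node,depth) pairs, a visited set of pairs, and a reverse sort of each node's neighbours) by a level-set iteration that advances the set of nodes reachable by exactly d edges one depth at a time, returning False as soon as a level is empty; no visited set and no sorting are needed.
import Mathlib
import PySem

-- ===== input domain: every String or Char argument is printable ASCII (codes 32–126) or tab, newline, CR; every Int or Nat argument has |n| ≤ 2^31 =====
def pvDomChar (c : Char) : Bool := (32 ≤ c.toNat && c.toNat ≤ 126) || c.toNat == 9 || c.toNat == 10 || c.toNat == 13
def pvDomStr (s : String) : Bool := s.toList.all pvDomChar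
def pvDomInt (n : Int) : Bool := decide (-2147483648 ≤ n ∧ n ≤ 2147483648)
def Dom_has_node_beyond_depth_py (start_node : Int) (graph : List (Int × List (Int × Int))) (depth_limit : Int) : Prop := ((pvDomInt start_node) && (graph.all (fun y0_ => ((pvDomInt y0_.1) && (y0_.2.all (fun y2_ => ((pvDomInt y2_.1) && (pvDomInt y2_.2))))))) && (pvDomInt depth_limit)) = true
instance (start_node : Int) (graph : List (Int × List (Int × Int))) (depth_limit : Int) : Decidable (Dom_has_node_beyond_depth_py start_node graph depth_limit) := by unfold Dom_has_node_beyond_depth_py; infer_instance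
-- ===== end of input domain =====

-- B replaces A's depth-tagged DFS (stack + visited set of (node,depth) pairs + per-node sort)
-- by a level-set iteration: the set of nodes reachable by a walk of exactly d edges, advanced
-- one depth at a time; objective: alternative (no visited set of pairs, no sorting).

-- ===== PORT A =====
-- shared lookup helper: graph.get(n, [])
def pvNbrs (graph : List (Int × List (Int × Int))) (n : Int) : List (Int × Int) :=
  (PySem.Dict.mk graph).getD n []

-- termination bookkeeping for A's while-loop (not part of the algorithm)
def pvMaxDeg (graph : List (Int × List (Int × Int))) : Nat :=
  graph.foldr (fun p m => max p.2.length m) 0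

def pvW (graph : List (Int × List (Int × Int))) : Nat := pvMaxDeg graph + 2

def pvMeasure (graph : List (Int × List (Int × Int))) (depth_limit : Int)
    (frontier : List (Int × Int)) : Nat :=
  (frontier.map (fun p => pvW graph ^ (depth_limit + 2 - p.2).toNat)).sum

theorem pvNbrs_nil (c : Int) : pvNbrs [] c = [] := rfl

theorem pvNbrs_cons (k : Int) (vl : List (Int × Int)) (t : List (Int × List (Int × Int))) (c : Int) :
    pvNbrs ((k, vl) :: t) c = if k == c then vl else pvNbrs t c := by
  simp only [pvNbrs, PySem.Dict.getD_eq_get?_getD, PySem.Dict.get?_mk_cons]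
  by_cases h : k == c <;> simp [h]

theorem pvNbrs_length_le (graph : List (Int × List (Int × Int))) (c : Int) :
    (pvNbrs graph c).length ≤ pvMaxDeg graph := by
  induction graph with
  | nil => simp [pvNbrs_nil]
  | cons p t ih =>
    rcases p with ⟨k, vl⟩
    rw [pvNbrs_cons]
    have hM : pvMaxDeg ((k, vl) :: t) = max vl.length (pvMaxDeg t) := rfl
    rw [hM]
    by_cases h : k == c
    · rw [if_pos h]; exact le_max_left _ _
    · rw [if_neg h]; exact le_trans ih (le_max_right _ _)

-- A: stack of (node, depth) pairs, visited set of pairs, pop from the top,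
-- push the reverse-sorted neighbours; True as soon as a pair deeper than the limit is popped.
def dfsLoop (graph : List (Int × List (Int × Int))) (depth_limit : Int)
    (visited : List (Int × Int)) (frontier : List (Int × Int)) : Bool :=
  match frontier with
  | [] => false
  | (c, d) :: rest =>
    if PySem.Set.contains visited (c, d) then
      dfsLoop graph depth_limit visited rest
    else
      if d > depth_limit then true
      else
        dfsLoop graph depth_limit (PySem.Set.add visited (c, d))
          (((PySem.List.sorted ((pvNbrs graph c).map Prod.fst) (fun x => x) true).reverse.map
              (fun m => (m, d + 1))) ++ rest)
termination_by pvMeasure graph depth_limit frontier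
decreasing_by
  · simp only [pvMeasure, List.map_cons, List.sum_cons]
    have : 0 < pvW graph ^ (depth_limit + 2 - d).toNat := Nat.pow_pos (by simp [pvW])
    omega
  · rename_i _ hd
    simp only [pvMeasure, List.map_cons, List.sum_cons, List.map_append, List.sum_append]
    have key : ∀ (L : List Int), ((L.map (fun m => (m, d + 1))).map
        (fun p => pvW graph ^ (depth_limit + 2 - p.2).toNat)).sum
        = L.length * pvW graph ^ (depth_limit + 2 - (d + 1)).toNat := by
      intro L
      induction L with
      | nil => simp
      | cons x t ih =>
        simp only [List.map_cons, List.sum_cons, List.length_cons, ih]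
        ring
    rw [key]
    have hlen : (PySem.List.sorted ((pvNbrs graph c).map Prod.fst) (fun x => x) true).reverse.length
        < pvW graph := by
      have h1 := pvNbrs_length_le graph c
      simp only [List.length_reverse, PySem.List.length_sorted, List.length_map, pvW]
      omega
    have hexp : (depth_limit + 2 - d).toNat = (depth_limit + 2 - (d + 1)).toNat + 1 := by omega
    have hpos : 0 < pvW graph ^ (depth_limit + 2 - (d + 1)).toNat := Nat.pow_pos (by simp [pvW])
    have hlt : (PySem.List.sorted ((pvNbrs graph c).map Prod.fst) (fun x => x) true).reverse.length
        * pvW graph ^ (depth_limit + 2 - (d + 1)).toNat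
        < pvW graph ^ (depth_limit + 2 - d).toNat := by
      rw [hexp, pow_succ]
      calc _ < pvW graph * pvW graph ^ (depth_limit + 2 - (d + 1)).toNat :=
              Nat.mul_lt_mul_of_lt_of_le hlen le_rfl hpos
        _ = _ := Nat.mul_comm _ _
    omega

def has_node_beyond_depth_py (start_node : Int) (graph : List (Int × List (Int × Int))) (depth_limit : Int) : Bool :=
  dfsLoop graph depth_limit [] [(start_node, 0)]

-- ===== PORT B =====
-- one level-advance: {nbr for node in level for nbr, _ in graph.get(node, [])}
def pvStep (graph : List (Int × List (Int × Int))) (level : List Int) : List Int :=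
  PySem.Set.ofList (level.flatMap (fun n => (pvNbrs graph n).map Prod.fst))

def pvLevelLoop (graph : List (Int × List (Int × Int))) : Nat → List Int → Bool
  | 0, _ => true
  | k + 1, level =>
    if pvStep graph level = [] then false
    else pvLevelLoop graph k (pvStep graph level)

def has_node_beyond_depth_py_alt (start_node : Int) (graph : List (Int × List (Int × Int))) (depth_limit : Int) : Bool :=
  if depth_limit < 0 then true
  else pvLevelLoop graph (depth_limit + 1).toNat [start_node]

-- ===== PRECONDITION & SPEC =====
def Spec_has_node_beyond_depth_py (start_node : Int) (graph : List (Int × List (Int × Int))) (depth_limit : Int) (out : Bool) : Prop := out = has_node_beyond_depth_py_alt start_node graph depth_limit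
instance (start_node : Int) (graph : List (Int × List (Int × Int))) (depth_limit : Int) (out : Bool) : Decidable (Spec_has_node_beyond_depth_py start_node graph depth_limit out) := by unfold Spec_has_node_beyond_depth_py; infer_instance

-- ===== CLAIM (what is proved, stated in full; the proofs are below) =====
def Claim_equal_has_node_beyond_depth_py : Prop := ∀ (start_node : Int) (graph : List (Int × List (Int × Int))) (depth_limit : Int), Dom_has_node_beyond_depth_py start_node graph depth_limit → Spec_has_node_beyond_depth_py start_node graph depth_limit (has_node_beyond_depth_py start_node graph depth_limit)

-- ===== LEMMAS AND PROOFS =====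

-- walks: pvWalk g m n k holds iff the graph has a walk of exactly k edges from m to n
def pvWalk (g : List (Int × List (Int × Int))) (m n : Int) : Nat → Prop
  | 0 => m = n
  | k + 1 => ∃ m', m' ∈ (pvNbrs g m).map Prod.fst ∧ pvWalk g m' n k

def pvAt (g : List (Int × List (Int × Int))) (s : Int) (k : Nat) : Prop := ∃ n, pvWalk g s n k

theorem pvWalk_succ_iff (g : List (Int × List (Int × Int))) (n : Int) (k : Nat) :
    ∀ m, pvWalk g m n (k + 1) ↔ ∃ p, pvWalk g m p k ∧ n ∈ (pvNbrs g p).map Prod.fst := by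
  induction k with
  | zero => intro m; simp [pvWalk]
  | succ k ih =>
    intro m
    constructor
    · rintro ⟨m', hm', hw⟩
      rcases (ih m').mp hw with ⟨p, hp, hn⟩
      exact ⟨p, ⟨m', hm', hp⟩, hn⟩
    · rintro ⟨p, ⟨m', hm', hp⟩, hn⟩
      exact ⟨m', hm', (ih m').mpr ⟨p, hp, hn⟩⟩

theorem pvAt_of_succ (g : List (Int × List (Int × Int))) (s : Int) (k : Nat)
    (h : pvAt g s (k + 1)) : pvAt g s k := by
  rcases h with ⟨n, w⟩
  rcases (pvWalk_succ_iff g n k s).mp w with ⟨p, hp, _⟩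
  exact ⟨p, hp⟩

theorem pvAt_sub (g : List (Int × List (Int × Int))) (s : Int) (j : Nat) :
    ∀ i, pvAt g s (j + i) → pvAt g s j
  | 0, h => h
  | i + 1, h => pvAt_sub g s j i (pvAt_of_succ g s (j + i) (by rwa [Nat.add_succ] at h))

theorem pvAt_mono (g : List (Int × List (Int × Int))) (s : Int) {j k : Nat} (h : j ≤ k)
    (hk : pvAt g s k) : pvAt g s j := by
  obtain ⟨i, rfl⟩ := Nat.exists_eq_add_of_le h
  exact pvAt_sub g s j i hk

theorem dfs_sound (g : List (Int × List (Int × Int))) (l : Int) (s : Int)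
    (v f : List (Int × Int)) :
    (∀ p ∈ f, 0 ≤ p.2 ∧ pvWalk g s p.1 p.2.toNat) → dfsLoop g l v f = true →
    ∃ d : Int, l < d ∧ 0 ≤ d ∧ pvAt g s d.toNat := by
  fun_induction dfsLoop g l v f with
  | case1 => intro _ h; simp at h
  | case2 v c d rest hin ih =>
    intro hf ht
    exact ih (fun p hp => hf p (List.mem_cons_of_mem _ hp)) ht
  | case3 v c d rest hin hd =>
    intro hf _
    rcases hf (c, d) List.mem_cons_self with ⟨h0, hw⟩
    exact ⟨d, by omega, h0, ⟨c, hw⟩⟩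
  | case4 v c d rest hin hd ih =>
    intro hf ht
    apply ih _ ht
    intro p hp
    rcases List.mem_append.mp hp with hp | hp
    · rcases List.mem_map.mp hp with ⟨m, hm, rfl⟩
      have hm' : m ∈ (pvNbrs g c).map Prod.fst := by
        simpa [PySem.List.mem_sorted] using List.mem_reverse.mp hm
      rcases hf (c, d) List.mem_cons_self with ⟨h0, hw⟩
      refine ⟨by omega, ?_⟩
      have : (d + 1).toNat = d.toNat + 1 := by omega
      rw [this]
      exact (pvWalk_succ_iff g m d.toNat s).mpr ⟨c, hw, hm'⟩
    · exact hf p (List.mem_cons_of_mem _ hp)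

theorem dfs_closed (g : List (Int × List (Int × Int))) (l : Int) (v : List (Int × Int))
    (hv : ∀ p ∈ v, p.2 ≤ l ∧ ∀ m ∈ (pvNbrs g p.1).map Prod.fst, (m, p.2 + 1) ∈ v) :
    ∀ (k : Nat) (m e : Int), (m, e) ∈ v → ∀ n, pvWalk g m n k → e + (k : Int) ≤ l := by
  intro k
  induction k with
  | zero => intro m e hm n w; have := (hv _ hm).1; simpa using this
  | succ k ih =>
    intro m e hm n w
    rcases w with ⟨m', hm', hw⟩
    have h2 := (hv _ hm).2 m' hm'
    have := ih m' (e + 1) h2 n hw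
    push_cast at this ⊢
    omega

theorem dfs_complete (g : List (Int × List (Int × Int))) (l : Int) (v f : List (Int × Int)) :
    (∀ p ∈ v, p.2 ≤ l ∧ ∀ m ∈ (pvNbrs g p.1).map Prod.fst, (m, p.2 + 1) ∈ v ∨ (m, p.2 + 1) ∈ f) →
    dfsLoop g l v f = false →
    ∀ m e, ((m, e) ∈ v ∨ (m, e) ∈ f) → ∀ n (k : Nat), pvWalk g m n k → e + (k : Int) ≤ l := by
  fun_induction dfsLoop g l v f with
  | case1 v =>
    intro hv _ m e hme n k w
    rcases hme with hme | hme
    · have hv' : ∀ p ∈ v, p.2 ≤ l ∧ ∀ m' ∈ (pvNbrs g p.1).map Prod.fst, (m', p.2 + 1) ∈ v := by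
        intro p hp
        refine ⟨(hv p hp).1, fun m' hm' => ?_⟩
        rcases (hv p hp).2 m' hm' with h | h
        · exact h
        · simp at h
      exact dfs_closed g l v hv' k m e hme n w
    · simp at hme
  | case2 v c d rest hin ih =>
    intro hv hfalse m e hme n k w
    have hcd : (c, d) ∈ v := (PySem.Set.contains_iff v (c, d)).mp hin
    refine ih ?_ hfalse m e ?_ n k w
    · intro p hp
      refine ⟨(hv p hp).1, fun m' hm' => ?_⟩
      rcases (hv p hp).2 m' hm' with h | h
      · exact Or.inl h
      · rcases List.mem_cons.mp h with h | h
        · exact Or.inl (h ▸ hcd)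
        · exact Or.inr h
    · rcases hme with hme | hme
      · exact Or.inl hme
      · rcases List.mem_cons.mp hme with h | h
        · exact Or.inl (h ▸ hcd)
        · exact Or.inr h
  | case3 v c d rest hin hd =>
    intro _ hfalse
    simp at hfalse
  | case4 v c d rest hin hd ih =>
    intro hv hfalse m e hme n k w
    have hch : ∀ m', m' ∈ (pvNbrs g c).map Prod.fst →
        (m', d + 1) ∈ (PySem.List.sorted ((pvNbrs g c).map Prod.fst) (fun x => x) true).reverse.map
          (fun m => (m, d + 1)) := by
      intro m' hm'
      exact List.mem_map.mpr ⟨m', List.mem_reverse.mpr (by simpa [PySem.List.mem_sorted] using hm'), rfl⟩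
    have hv' : ∀ p ∈ PySem.Set.add v (c, d), p.2 ≤ l ∧ ∀ m' ∈ (pvNbrs g p.1).map Prod.fst,
        (m', p.2 + 1) ∈ PySem.Set.add v (c, d) ∨ (m', p.2 + 1) ∈
          (PySem.List.sorted ((pvNbrs g c).map Prod.fst) (fun x => x) true).reverse.map
            (fun m => (m, d + 1)) ++ rest := by
      intro p hp
      rcases (PySem.Set.mem_add v (c, d) p).mp hp with hp | hp
      · refine ⟨(hv p hp).1, fun m' hm' => ?_⟩
        rcases (hv p hp).2 m' hm' with h | h
        · exact Or.inl ((PySem.Set.mem_add v (c, d) _).mpr (Or.inl h))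
        · rcases List.mem_cons.mp h with h | h
          · exact Or.inl ((PySem.Set.mem_add v (c, d) _).mpr (Or.inr h))
          · exact Or.inr (List.mem_append_right _ h)
      · subst hp
        refine ⟨by omega, fun m' hm' => Or.inr (List.mem_append_left _ (hch m' hm'))⟩
    have IH := ih hv' hfalse
    rcases hme with hme | hme
    · exact IH m e (Or.inl ((PySem.Set.mem_add v (c, d) _).mpr (Or.inl hme))) n k w
    · rcases List.mem_cons.mp hme with heq | hme
      · have hm : m = c := congrArg Prod.fst heq
        have he : e = d := congrArg Prod.snd heq
        subst hm; subst he
        cases k with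
        | zero => omega
        | succ k =>
          rcases w with ⟨m', hm', hw⟩
          have := IH m' (e + 1) (Or.inr (List.mem_append_left _ (hch m' hm'))) n k hw
          push_cast at this ⊢
          omega
      · exact IH m e (Or.inr (List.mem_append_right _ hme)) n k w

theorem A_iff (s : Int) (g : List (Int × List (Int × Int))) (l : Int) :
    has_node_beyond_depth_py s g l = true ↔ pvAt g s (l + 1).toNat := by
  unfold has_node_beyond_depth_py
  constructor
  · intro h
    have hf : ∀ p ∈ [((s : Int), (0 : Int))], 0 ≤ p.2 ∧ pvWalk g s p.1 p.2.toNat := by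
      intro p hp
      simp at hp
      subst hp
      exact ⟨le_refl 0, rfl⟩
    rcases dfs_sound g l s [] [(s, 0)] hf h with ⟨d, hld, h0, hat⟩
    exact pvAt_mono g s (by omega) hat
  · intro hat
    by_contra h
    rw [Bool.not_eq_true] at h
    rcases hat with ⟨n, w⟩
    have := dfs_complete g l [] [(s, 0)] (by simp) h s 0 (Or.inr (by simp)) n (l + 1).toNat w
    omega

theorem step_mem (g : List (Int × List (Int × Int))) (lvl : List Int) (n : Int) :
    n ∈ pvStep g lvl ↔ ∃ m ∈ lvl, n ∈ (pvNbrs g m).map Prod.fst := by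
  simp [pvStep, PySem.Set.mem_ofList, List.mem_flatMap]

theorem level_iff (g : List (Int × List (Int × Int))) (s : Int) :
    ∀ (cap : Nat) (lvl : List Int) (j : Nat),
    lvl ≠ [] → (∀ n, n ∈ lvl ↔ pvWalk g s n j) →
    (pvLevelLoop g cap lvl = true ↔ pvAt g s (j + cap)) := by
  intro cap
  induction cap with
  | zero =>
    intro lvl j hne hch
    simp [pvLevelLoop]
    rcases List.exists_mem_of_ne_nil lvl hne with ⟨n, hn⟩
    exact ⟨n, (hch n).mp hn⟩
  | succ cap ih =>
    intro lvl j hne hch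
    have hch' : ∀ n, n ∈ pvStep g lvl ↔ pvWalk g s n (j + 1) := by
      intro n
      rw [step_mem, pvWalk_succ_iff]
      constructor
      · rintro ⟨m, hm, hn⟩; exact ⟨m, (hch m).mp hm, hn⟩
      · rintro ⟨p, hp, hn⟩; exact ⟨p, (hch p).mpr hp, hn⟩
    by_cases hE : pvStep g lvl = []
    · simp only [pvLevelLoop, hE, if_pos]
      constructor
      · intro h; simp at h
      · intro hat
        have h1 : pvAt g s (j + 1) := pvAt_mono g s (by omega) hat
        rcases h1 with ⟨n, w⟩
        have : n ∈ pvStep g lvl := (hch' n).mpr w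
        simp [hE] at this
    · simp only [pvLevelLoop, hE, if_false]
      rw [ih (pvStep g lvl) (j + 1) hE hch']
      rw [show j + 1 + cap = j + (cap + 1) by omega]
  
theorem B_iff (s : Int) (g : List (Int × List (Int × Int))) (l : Int) :
    has_node_beyond_depth_py_alt s g l = true ↔ pvAt g s (l + 1).toNat := by
  unfold has_node_beyond_depth_py_alt
  by_cases hl : l < 0
  · simp only [hl, if_pos]
    have h0 : (l + 1).toNat = 0 := by omega
    rw [h0]
    simp
    exact ⟨s, rfl⟩
  · simp only [hl, if_false]
    have := level_iff g s (l + 1).toNat [s] 0 (by simp)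
      (fun n => by simp [pvWalk, eq_comm])
    simpa using this

-- ===== VERDICT (by name: the statement is the Claim_ definition above) =====
theorem has_node_beyond_depth_py_spec : Claim_equal_has_node_beyond_depth_py := by
  intro s g l _
  unfold Spec_has_node_beyond_depth_py
  have := (A_iff s g l).trans (B_iff s g l).symm
  exact Bool.eq_iff_iff.mpr this
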